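-- pv_equiv track=rewrite | github.com/caravana-assistant/grab | src/grab/downloader.py | _build_lang_fallbacks
-- ===== SOURCE A (Python) =====
-- from typing import Optional, Dict, List
--
-- def _build_lang_fallbacks(lang: str) -> List[str]:
--     norm = {"br": "pt-BR", "ptbr": "pt-BR", "pt_br": "pt-BR",
--             "pt-pt": "pt-PT", "pt_pt": "pt-PT", "pt-br": "pt-BR"}
--     lang = norm.get(lang.strip().lower(), lang) if lang else "pt"
--     tries = [lang]
--     if lang in ("pt", "pt-BR", "pt-PT"):
--         for alt in ("pt-BR", "pt", "pt-PT"):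
--             if alt not in tries:
--                 tries.append(alt)
--     return tries
-- ===== SOURCE B (Python) =====
-- def _build_lang_fallbacks(lang):
--     norm = {"br": "pt-BR", "ptbr": "pt-BR", "pt_br": "pt-BR",
--             "pt-pt": "pt-PT", "pt_pt": "pt-PT", "pt-br": "pt-BR"}
--     lang = norm.get(lang.strip().lower(), lang) if lang else "pt"
--     table = {"pt": ["pt", "pt-BR", "pt-PT"],
--              "pt-BR": ["pt-BR", "pt", "pt-PT"],
--              "pt-PT": ["pt-PT", "pt-BR", "pt"]}
--     return list(table.get(lang, [lang]))
-- ===== Notes on version B (the rewrite author's own statement) =====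
-- stated objective: simpler
-- what changed: Replaces the seeded-list loop with duplicate checks by a closed-form lookup table mapping each pt-family language to its exact fallback list.
import Mathlib
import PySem

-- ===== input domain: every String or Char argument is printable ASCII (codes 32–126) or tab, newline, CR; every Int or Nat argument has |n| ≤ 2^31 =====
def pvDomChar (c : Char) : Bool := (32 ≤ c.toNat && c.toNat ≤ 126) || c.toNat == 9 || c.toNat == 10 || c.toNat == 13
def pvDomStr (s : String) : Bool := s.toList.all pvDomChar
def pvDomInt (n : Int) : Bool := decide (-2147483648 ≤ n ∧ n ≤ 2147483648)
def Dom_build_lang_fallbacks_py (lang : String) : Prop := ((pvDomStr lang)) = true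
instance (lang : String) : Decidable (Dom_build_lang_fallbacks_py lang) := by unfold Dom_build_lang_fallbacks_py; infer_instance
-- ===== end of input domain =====

-- B replaces A's seeded-list loop with duplicate checks by a closed-form fallback table (return value only).

-- ===== PORT A =====
def pvNorm : PySem.Dict String String :=
  PySem.Dict.ofList [("br", "pt-BR"), ("ptbr", "pt-BR"), ("pt_br", "pt-BR"),
                     ("pt-pt", "pt-PT"), ("pt_pt", "pt-PT"), ("pt-br", "pt-BR")]

def build_lang_fallbacks_py (lang : String) : List String :=
  let lang := if lang ≠ "" then (pvNorm.get? (PySem.Str.lower (PySem.Str.strip lang))).getD lang else "pt"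
  let tries := [lang]
  let tries :=
    if lang = "pt" ∨ lang = "pt-BR" ∨ lang = "pt-PT" then
      ["pt-BR", "pt", "pt-PT"].foldl
        (fun tries alt => if alt ∉ tries then tries ++ [alt] else tries) tries
    else tries
  tries

-- ===== PORT B =====
def pvTable : PySem.Dict String (List String) :=
  PySem.Dict.ofList [("pt", ["pt", "pt-BR", "pt-PT"]),
                     ("pt-BR", ["pt-BR", "pt", "pt-PT"]),
                     ("pt-PT", ["pt-PT", "pt-BR", "pt"])]

def build_lang_fallbacks_py_alt (lang : String) : List String :=
  let lang := if lang ≠ "" then (pvNorm.get? (PySem.Str.lower (PySem.Str.strip lang))).getD lang else "pt"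
  (pvTable.get? lang).getD [lang]

-- ===== PRECONDITION & SPEC =====
def Spec_build_lang_fallbacks_py (lang : String) (out : List String) : Prop := out = build_lang_fallbacks_py_alt lang
instance (lang : String) (out : List String) : Decidable (Spec_build_lang_fallbacks_py lang out) := by unfold Spec_build_lang_fallbacks_py; infer_instance

-- ===== CLAIM (what is proved, stated in full; the proofs are below) =====
def Claim_equal_build_lang_fallbacks_py : Prop := ∀ (lang : String), Dom_build_lang_fallbacks_py lang → Spec_build_lang_fallbacks_py lang (build_lang_fallbacks_py lang)

-- ===== LEMMAS AND PROOFS =====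

-- ===== VERDICT (by name: the statement is the Claim_ definition above) =====
-- After normalization both programs depend only on the normalized language l:
-- case on whether l is one of the three pt-family strings.
theorem pv_body (l : String) :
    (let tries := [l]
     let tries :=
       if l = "pt" ∨ l = "pt-BR" ∨ l = "pt-PT" then
         ["pt-BR", "pt", "pt-PT"].foldl
           (fun tries alt => if alt ∉ tries then tries ++ [alt] else tries) tries
       else tries
     tries) = (pvTable.get? l).getD [l] := by
  by_cases h1 : l = "pt"
  · subst h1; decide
  by_cases h2 : l = "pt-BR"
  · subst h2; decide
  by_cases h3 : l = "pt-PT"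
  · subst h3; decide
  simp [pvTable, PySem.Dict.ofList, PySem.Dict.update, PySem.Dict.get?_insert, PySem.Dict.get?_empty, h1, h2, h3]

theorem build_lang_fallbacks_py_spec : Claim_equal_build_lang_fallbacks_py := by
  intro lang _
  unfold Spec_build_lang_fallbacks_py build_lang_fallbacks_py build_lang_fallbacks_py_alt
  exact pv_body _
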